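-- pv_equiv track=rewrite | github.com/passing/aeropy | aeropy.py | _find_repeated_ngrams
-- ===== SOURCE A (Python) =====
-- def _find_repeated_ngrams(objects):
--     ngrams = {}
--
--     # keep track of positions for searching
--     pos_search = list(range(len(objects)))
--
--     # store all ngrams and their occurences in dictionary
--     for length in range(2, len(objects) // 2 + 1):
--         if len(pos_search) > 0:
--             n = 0
--             while n < len(pos_search):
--                 pos = pos_search[n]
--                 if pos + length <= len(objects):
--                     ngram = tuple(objects[pos: pos + length])
--                     try:
--                         ngrams[ngram].append(pos)
--                     except KeyError:
--                         ngrams[ngram] = [pos]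
--                     n += 1
--                 else:
--                     pos_search.pop(n)
--
--             # exclude positions that got no duplicates so far
--             n = 0
--             while n < len(pos_search):
--                 pos = pos_search[n]
--                 ngram = tuple(objects[pos: pos + length])
--                 if len(ngrams[ngram]) < 2:
--                     pos_search.pop(n)
--                 else:
--                     n += 1
--
--     # remove overlaps
--     for ngram, n_positions in ngrams.items():
--         c = 1
--         while c < len(n_positions):
--             if n_positions[c] - n_positions[c - 1] < len(ngram):
--                 n_positions.pop(c)
--             else:
--                 c += 1
--
--     # remove single occurences
--     ngrams = dict(filter(lambda elem: len(elem[1]) > 1, ngrams.items()))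
--
--     return ngrams
-- ===== SOURCE B (Python) =====
-- def _find_repeated_ngrams(objects):
--     # per-length grouping: bucket every start position by its ngram, drop
--     # overlaps greedily, and stop as soon as no ngram of the current length
--     # repeats (a repeated longer ngram would imply a repeated shorter one)
--     n = len(objects)
--     result = {}
--     length = 2
--     while length <= n // 2:
--         groups = {}
--         for pos in range(n - length + 1):
--             groups.setdefault(tuple(objects[pos:pos + length]), []).append(pos)
--         found = False
--         for ngram, positions in groups.items():
--             if len(positions) < 2:
--                 continue
--             found = True
--             kept = [positions[0]]
--             for p in positions[1:]:
--                 if p - kept[-1] >= length: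
--                     kept.append(p)
--             if len(kept) > 1:
--                 result[ngram] = kept
--         if not found:
--             break
--         length += 1
--     return result
-- ===== Notes on version B (the rewrite author's own statement) =====
-- stated objective: alternative
-- what changed: A maintains a mutable pos_search list pruned by two pop-based while loops and one dict shared across all lengths; B instead builds an independent position-grouping dict per length, removes overlaps with an append-only kept list instead of popping in place, and stops at the first length with no repeated ngram (sound because a repeated (L+1)-gram implies a repeated L-gram).
import Mathlib
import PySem

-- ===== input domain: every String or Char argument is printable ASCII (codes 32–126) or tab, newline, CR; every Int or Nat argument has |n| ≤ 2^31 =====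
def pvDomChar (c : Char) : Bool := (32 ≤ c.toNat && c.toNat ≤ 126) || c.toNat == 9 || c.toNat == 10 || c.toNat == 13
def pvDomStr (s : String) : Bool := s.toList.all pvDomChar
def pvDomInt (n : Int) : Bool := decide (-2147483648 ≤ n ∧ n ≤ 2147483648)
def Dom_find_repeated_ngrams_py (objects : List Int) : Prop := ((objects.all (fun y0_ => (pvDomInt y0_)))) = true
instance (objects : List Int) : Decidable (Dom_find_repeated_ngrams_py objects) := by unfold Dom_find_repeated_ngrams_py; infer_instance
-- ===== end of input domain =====

-- B replaces A's position-pruning search (mutable pos_search, pop-based while loops) by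
-- independent per-length grouping with an early stop; equivalence is proved on the return value.

-- ===== PORT A =====

-- tuple(objects[pos : pos + length])
def pvNgram (objects : List Int) (pos length : Int) : List Int :=
  PySem.List.slice objects (some pos) (some (pos + length))

-- first inner while loop: record ngrams of surviving positions, pop positions too close to
-- the end (n is the Python loop index, Nat-exact since it starts at 0 and never goes negative;
-- the fuel argument counts the remaining iterations len(pos_search) - n exactly, so the
-- structural recursion performs precisely the Python loop's steps)
def pvLoop1go (objects : List Int) (length : Int) :
    Nat → PySem.Dict (List Int) (List Int) → List Int → Nat →
    PySem.Dict (List Int) (List Int) × List Int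
  | 0, ngrams, ps, _ => (ngrams, ps)
  | fuel + 1, ngrams, ps, n =>
    if h : n < ps.length then
      let pos := ps[n]
      if pos + length ≤ PySem.List.len objects then
        -- try: ngrams[ngram].append(pos) / except KeyError: ngrams[ngram] = [pos]
        pvLoop1go objects length fuel
          ((ngrams.modify (pvNgram objects pos length) [] (· ++ [pos]))) ps (n + 1)
      else
        -- pos_search.pop(n)  (0 ≤ n < len, so eraseIdx is exact)
        pvLoop1go objects length fuel ngrams (ps.eraseIdx n) n
    else (ngrams, ps)

def pvLoop1 (objects : List Int) (length : Int)
    (ngrams : PySem.Dict (List Int) (List Int)) (ps : List Int) (n : Nat) :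
    PySem.Dict (List Int) (List Int) × List Int :=
  pvLoop1go objects length (ps.length - n) ngrams ps n

-- second inner while loop: pop positions whose current ngram has no duplicate yet
-- (every surviving pos has pos+length ≤ len(objects), so its ngram is a key of the dict
--  and ngrams[ngram] is the stored list: getD with [] is exact here; fuel as above)
def pvLoop2go (objects : List Int) (length : Int)
    (ngrams : PySem.Dict (List Int) (List Int)) :
    Nat → List Int → Nat → List Int
  | 0, ps, _ => ps
  | fuel + 1, ps, n =>
    if h : n < ps.length then
      let pos := ps[n]
      if (ngrams.getD (pvNgram objects pos length) []).length < 2 then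
        pvLoop2go objects length ngrams fuel (ps.eraseIdx n) n
      else
        pvLoop2go objects length ngrams fuel ps (n + 1)
    else ps

def pvLoop2 (objects : List Int) (length : Int)
    (ngrams : PySem.Dict (List Int) (List Int)) (ps : List Int) (n : Nat) : List Int :=
  pvLoop2go objects length ngrams (ps.length - n) ps n

-- remove-overlaps while loop on one positions list (c starts at 1 and stays ≥ 1;
-- 0 ≤ c-1 < c < len at each read, so getD/eraseIdx are exact; fuel = len - c exactly)
def pvDedupAgo (ngram : List Int) : Nat → List Int → Nat → List Int
  | 0, l, _ => l
  | fuel + 1, l, c =>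
    if c < l.length then
      if l.getD c 0 - l.getD (c - 1) 0 < (ngram.length : Int) then
        pvDedupAgo ngram fuel (l.eraseIdx c) c
      else
        pvDedupAgo ngram fuel l (c + 1)
    else l

def pvDedupA (ngram : List Int) (l : List Int) (c : Nat) : List Int :=
  pvDedupAgo ngram (l.length - c) l c

def find_repeated_ngrams_py (objects : List Int) : List (List Int × List Int) :=
  -- ngrams = {}; pos_search = list(range(len(objects)))
  -- for length in range(2, len(objects) // 2 + 1): if len(pos_search) > 0: two while loops
  let st := (PySem.List.pyRange 2 (PySem.Int.floordiv (PySem.List.len objects) 2 + 1) 1).foldl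
    (fun st length =>
      if 0 < st.2.length then
        let r1 := pvLoop1 objects length st.1 st.2 0
        (r1.1, pvLoop2 objects length r1.1 r1.2 0)
      else st)
    (PySem.Dict.empty, PySem.List.pyRange 0 (PySem.List.len objects) 1)
  -- for ngram, n_positions in ngrams.items(): dedup n_positions in place
  let items2 := st.1.items.map (fun e => (e.1, pvDedupA e.1 e.2 1))
  -- ngrams = dict(filter(lambda elem: len(elem[1]) > 1, ngrams.items())); the keys are
  -- pairwise distinct (dict items), so dict(...) keeps exactly the filtered pairs
  items2.filter (fun e => 1 < e.2.length)

-- ===== PORT B =====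

-- while length <= n // 2: group positions by ngram, emit repeated ones, stop when none
-- repeats (fuel = number of remaining candidate lengths, n // 2 + 1 - length, exactly)
def pvLevelsBgo (objects : List Int) :
    Nat → PySem.Dict (List Int) (List Int) → Int → PySem.Dict (List Int) (List Int)
  | 0, result, _ => result
  | fuel + 1, result, length =>
    if length ≤ PySem.Int.floordiv (PySem.List.len objects) 2 then
      -- groups = {}; for pos in range(n - length + 1): groups.setdefault(ngram, []).append(pos)
      let groups := (PySem.List.pyRange 0 (PySem.List.len objects - length + 1) 1).foldl
          (fun d pos => d.modify (pvNgram objects pos length) [] (· ++ [pos])) PySem.Dict.empty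
      -- for ngram, positions in groups.items(): skip singletons, keep non-overlapping, emit
      let st := groups.items.foldl
          (fun (st : PySem.Dict (List Int) (List Int) × Bool) it =>
            if it.2.length < 2 then st
            else
              -- kept = [positions[0]]; for p in positions[1:]: append if p - kept[-1] >= length
              -- (positions is nonempty here, so positions[0] and kept[-1] are exact)
              let kept := (PySem.List.slice it.2 (some 1) none).foldl
                  (fun kept p =>
                    if length ≤ p - PySem.List.pyGetD kept (-1) 0 then kept ++ [p] else kept)
                  [PySem.List.pyGetD it.2 0 0]
              ((if 1 < kept.length then st.1.insert it.1 kept else st.1), true))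
          (result, false)
      if st.2 then pvLevelsBgo objects fuel st.1 (length + 1) else st.1
    else result

def pvLevelsB (objects : List Int) (result : PySem.Dict (List Int) (List Int)) (length : Int) :
    PySem.Dict (List Int) (List Int) :=
  pvLevelsBgo objects
    (PySem.Int.floordiv (PySem.List.len objects) 2 + 1 - length).toNat result length

def find_repeated_ngrams_py_alt (objects : List Int) : List (List Int × List Int) :=
  (pvLevelsB objects PySem.Dict.empty 2).items

-- ===== PRECONDITION & SPEC =====
def Spec_find_repeated_ngrams_py (objects : List Int) (out : List (List Int × List Int)) : Prop := out = find_repeated_ngrams_py_alt objects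
instance (objects : List Int) (out : List (List Int × List Int)) : Decidable (Spec_find_repeated_ngrams_py objects out) := by unfold Spec_find_repeated_ngrams_py; infer_instance

-- ===== CLAIM (what is proved, stated in full; the proofs are below) =====
def Claim_equal_find_repeated_ngrams_py : Prop := ∀ (objects : List Int), Dom_find_repeated_ngrams_py objects → Spec_find_repeated_ngrams_py objects (find_repeated_ngrams_py objects)

-- ===== LEMMAS AND PROOFS =====

-- ---- canonical ngram / position-list vocabulary ----

def pvP (objects : List Int) : List Int := PySem.List.pyRange 0 (PySem.List.len objects) 1

def pvOcc (objects : List Int) (l : Int) : List Int :=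
  (pvP objects).filter (fun p => decide (p + l ≤ PySem.List.len objects))

def pvVocc (objects : List Int) (l : Int) (g : List Int) : List Int :=
  (pvOcc objects l).filter (fun q => pvNgram objects q l == g)

def pvRep (objects : List Int) (l p : Int) : Bool :=
  decide (2 ≤ (pvVocc objects l (pvNgram objects p l)).length)

def pvQ (objects : List Int) (l : Int) (p : Int) : Bool :=
  if l ≤ 2 then true else pvRep objects (l - 1) p

def pvPS (objects : List Int) (l : Int) : List Int :=
  (pvP objects).filter (fun p => decide (p + (l - 1) ≤ PySem.List.len objects) && pvQ objects l p)

def pvRA (objects : List Int) (l : Int) : List Int :=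
  (pvOcc objects l).filter (pvQ objects l)

def pvGrp (objects : List Int) (l : Int) (R : List Int) : List (List Int × List Int) :=
  (PySem.Set.ofList (R.map (fun p => pvNgram objects p l))).map
    (fun g => (g, R.filter (fun p => pvNgram objects p l == g)))

def pvGo (L : Int) : Int → List Int → List Int
  | _, [] => []
  | last, y :: ys => if L ≤ y - last then y :: pvGo L y ys else pvGo L last ys

def pvKeep (L : Int) : List Int → List Int
  | [] => []
  | x :: xs => x :: pvGo L x xs

def pvFinal (items : List (List Int × List Int)) : List (List Int × List Int) :=
  (items.map (fun e => (e.1, pvKeep (e.1.length : Int) e.2))).filter (fun e => 1 < e.2.length)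

def pvEmit (l : Int) (items : List (List Int × List Int)) : List (List Int × List Int) :=
  ((items.filter (fun it => !(it.2.length < 2 : Bool))).map (fun it => (it.1, pvKeep l it.2))).filter
    (fun e => 1 < e.2.length)

-- ---- ngram facts ----

lemma pvNgram_eq (objects : List Int) {p l : Int} (hp : 0 ≤ p) (hl : 0 ≤ l) :
    pvNgram objects p l = (objects.drop p.toNat).take l.toNat := by
  unfold pvNgram
  rw [PySem.List.slice_toNat objects hp (by omega)]
  congr 1
  omega


lemma length_pvNgram (objects : List Int) {p l : Int} (hp : 0 ≤ p) (hl : 0 ≤ l)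
    (hle : p + l ≤ PySem.List.len objects) : (pvNgram objects p l).length = l.toNat := by
  rw [pvNgram_eq objects hp hl]
  rw [PySem.List.len_eq] at hle
  simp only [List.length_take, List.length_drop]
  omega


lemma pvNgram_prefix (objects : List Int) {p q l : Int} (hp : 0 ≤ p) (hq : 0 ≤ q) (hl : 2 ≤ l)
    (h : pvNgram objects p l = pvNgram objects q l) :
    pvNgram objects p (l - 1) = pvNgram objects q (l - 1) := by
  have e : ∀ r : Int, 0 ≤ r →
      pvNgram objects r (l - 1) = (pvNgram objects r l).take ((l - 1).toNat) := by
    intro r hr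
    rw [pvNgram_eq objects hr (by omega : (0:Int) ≤ l - 1),
        pvNgram_eq objects hr (by omega : (0:Int) ≤ l), List.take_take]
    congr 1
    omega
  rw [e p hp, e q hq, h]


lemma mem_pvP (objects : List Int) {p : Int} :
    p ∈ pvP objects ↔ 0 ≤ p ∧ p < PySem.List.len objects := by
  unfold pvP
  rw [PySem.List.mem_pyRange_one]


lemma mem_pvOcc (objects : List Int) {l p : Int} (hl : 1 ≤ l) :
    p ∈ pvOcc objects l ↔ 0 ≤ p ∧ p + l ≤ PySem.List.len objects := by
  unfold pvOcc
  rw [List.mem_filter, mem_pvP, decide_eq_true_eq]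
  constructor
  · rintro ⟨⟨h1, _⟩, h3⟩; exact ⟨h1, h3⟩
  · rintro ⟨h1, h2⟩; exact ⟨⟨h1, by omega⟩, h2⟩


-- ---- generic filter facts ----

lemma occ_eq_pyRange (objects : List Int) {l : Int} (h1 : 1 ≤ l)
    (h2 : l ≤ PySem.List.len objects + 1) :
    pvOcc objects l = PySem.List.pyRange 0 (PySem.List.len objects - l + 1) 1 := by
  unfold pvOcc pvP
  rw [PySem.List.pyRange_one_append 0 (PySem.List.len objects - l + 1) (PySem.List.len objects)
    (by omega) (by omega)]
  rw [List.filter_append]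
  have h3 : (PySem.List.pyRange 0 (PySem.List.len objects - l + 1) 1).filter
      (fun p => decide (p + l ≤ PySem.List.len objects))
      = PySem.List.pyRange 0 (PySem.List.len objects - l + 1) 1 := by
    rw [List.filter_eq_self]
    intro a ha
    rw [PySem.List.mem_pyRange_one] at ha
    simp only [decide_eq_true_eq]
    omega
  have h4 : (PySem.List.pyRange (PySem.List.len objects - l + 1) (PySem.List.len objects) 1).filter
      (fun p => decide (p + l ≤ PySem.List.len objects)) = [] := by
    rw [List.filter_eq_nil_iff]
    intro a ha
    rw [PySem.List.mem_pyRange_one] at ha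
    simp only [decide_eq_true_eq]
    omega
  rw [h3, h4, List.append_nil]


-- ---- repetition predicate facts ----

lemma pvRep_mono (objects : List Int) {l p : Int} (hp : 0 ≤ p) (hl : 3 ≤ l)
    (h : pvRep objects l p = true) : pvRep objects (l - 1) p = true := by
  unfold pvRep pvVocc at h ⊢
  rw [decide_eq_true_eq] at h ⊢
  have key : ((pvOcc objects l).filter
        (fun q => pvNgram objects q l == pvNgram objects p l)).Sublist
      ((pvOcc objects (l - 1)).filter
        (fun q => pvNgram objects q (l - 1) == pvNgram objects p (l - 1))) := by
    unfold pvOcc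
    rw [List.filter_filter, List.filter_filter]
    have e1 : (pvP objects).filter
          (fun a => (pvNgram objects a l == pvNgram objects p l)
            && decide (a + l ≤ PySem.List.len objects))
        = (pvP objects).filter
          (fun a => ((pvNgram objects a l == pvNgram objects p l)
            && decide (a + l ≤ PySem.List.len objects)) && decide (0 ≤ a)) := by
      apply List.filter_congr
      intro x hx
      have hx0 := ((mem_pvP objects).1 hx).1
      simp [hx0]
    rw [e1]
    apply List.monotone_filter_right
    intro a ha
    simp only [Bool.and_eq_true, beq_iff_eq, decide_eq_true_eq] at ha ⊢
    obtain ⟨⟨hC, hin⟩, ha0⟩ := ha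
    exact ⟨pvNgram_prefix objects ha0 hp (by omega) hC, by omega⟩
  have := key.length_le
  omega

lemma hq_pvQ (objects : List Int) {l : Int} (hl : 2 ≤ l) :
    ∀ p ∈ pvOcc objects l, pvRep objects l p = true → pvQ objects l p = true := by
  intro p hp hrep
  unfold pvQ
  split
  · rfl
  · rename_i hl2
    exact pvRep_mono objects ((mem_pvOcc objects (by omega)).1 hp).1 (by omega) hrep


lemma pvVra_eq_pvVocc (objects : List Int) {l : Int} (q : Int → Bool) (hl : 2 ≤ l)
    (hq : ∀ p ∈ pvOcc objects l, pvRep objects l p = true → q p = true)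
    {g : List Int} (hrep : 2 ≤ (pvVocc objects l g).length) :
    ((pvOcc objects l).filter q).filter (fun p => pvNgram objects p l == g) = pvVocc objects l g := by
  unfold pvVocc
  rw [List.filter_comm, List.filter_eq_self]
  intro x hx
  have hx1 := List.mem_filter.1 hx
  have hgx : pvNgram objects x l = g := by simpa using hx1.2
  have hrx : pvRep objects l x = true := by
    unfold pvRep
    rw [hgx]
    simpa using hrep
  exact hq x hx1.1 hrx

-- ---- ordered-set filter lemma ----

lemma discard_filter (s : List (List Int)) (k : List Int) (Rep : List Int → Bool) :
    (PySem.Set.discard s k).filter Rep = PySem.Set.discard (s.filter Rep) k := by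
  unfold PySem.Set.discard
  rw [List.filter_comm]


lemma discard_of_not_mem {s : List (List Int)} {k : List Int} (h : k ∉ s) :
    PySem.Set.discard s k = s := by
  unfold PySem.Set.discard
  rw [List.filter_eq_self]
  intro a ha
  simp only [Bool.not_eq_eq_eq_not, Bool.not_true, beq_eq_false_iff_ne, ne_eq]
  rintro rfl
  exact h ha


lemma set_filter_eq (g : Int → List Int) (Rep : List Int → Bool) :
    ∀ (xs : List Int) (q : Int → Bool), (∀ x ∈ xs, Rep (g x) = true → q x = true) →
    (PySem.Set.ofList (xs.map g)).filter Rep = (PySem.Set.ofList ((xs.filter q).map g)).filter Rep := by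
  have sub : ∀ (k : List Int) (S : List (List Int)), Rep k = false →
      (k :: PySem.Set.discard S k).filter Rep = S.filter Rep := by
    intro k S hk
    rw [List.filter_cons_of_neg (by simp [hk]), discard_filter, discard_of_not_mem]
    intro hmem
    have := (List.mem_filter.1 hmem).2
    rw [hk] at this
    exact Bool.false_ne_true this
  intro xs
  induction xs with
  | nil => intro q h; rfl
  | cons x xs ih =>
    intro q h
    have hx' : ∀ a ∈ xs, Rep (g a) = true → q a = true :=
      fun a ha => h a (List.mem_cons_of_mem _ ha)
    cases hR : Rep (g x)
    · cases hq : q x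
      · rw [List.map_cons, PySem.Set.ofList_cons, sub _ _ hR, List.filter_cons_of_neg (by simp [hq])]
        exact ih q hx'
      · rw [List.map_cons, PySem.Set.ofList_cons, sub _ _ hR,
            List.filter_cons_of_pos (by simp [hq]), List.map_cons, PySem.Set.ofList_cons,
            sub _ _ hR]
        exact ih q hx'
    · have hqx : q x = true := h x List.mem_cons_self hR
      rw [List.map_cons, PySem.Set.ofList_cons, List.filter_cons_of_pos (by simp [hR]),
          List.filter_cons_of_pos (by simp [hqx]), List.map_cons, PySem.Set.ofList_cons,
          List.filter_cons_of_pos (by simp [hR]), discard_filter, discard_filter, ih q hx']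


-- ---- keep / dedup ----

lemma pvKeep_short (L : Int) {xs : List Int} (h : 1 < (pvKeep L xs).length) : 2 ≤ xs.length := by
  match xs with
  | [] => simp [pvKeep] at h
  | [x] => simp [pvKeep, pvGo] at h
  | x :: y :: xs => simp


lemma keep_fold (L : Int) : ∀ (xs acc : List Int) (last : Int),
    xs.foldl (fun kept p => if L ≤ p - PySem.List.pyGetD kept (-1) 0 then kept ++ [p] else kept)
      (acc ++ [last]) = acc ++ last :: pvGo L last xs := by
  intro xs
  induction xs with
  | nil => intro acc last; simp [pvGo]
  | cons y ys ih =>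
    intro acc last
    simp only [List.foldl_cons, PySem.List.pyGetD_neg_one_append_singleton]
    by_cases hc : L ≤ y - last
    · rw [if_pos hc]
      have h2 := ih (acc ++ [last]) y
      rw [show acc ++ [last] ++ [y] = (acc ++ [last]) ++ [y] by simp]
      rw [h2]
      simp [pvGo, hc]
    · rw [if_neg hc]
      rw [ih acc last]
      simp [pvGo, hc]


lemma getD_append_cons (A : List Int) (y : Int) (ys : List Int) :
    (A ++ y :: ys).getD A.length 0 = y := by
  rw [List.getD_eq_getElem?_getD, List.getElem?_append_right (le_refl _)]
  simp

lemma eraseIdx_append_cons (A : List Int) (y : Int) (ys : List Int) :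
    (A ++ y :: ys).eraseIdx A.length = A ++ ys := by
  rw [List.eraseIdx_eq_take_drop_succ, List.take_left]
  congr 1
  have h1 : A ++ y :: ys = (A ++ [y]) ++ ys := by simp
  rw [h1, show A.length + 1 = (A ++ [y]).length by simp, List.drop_left]

lemma dedupA_eq_keep (g : List Int) : ∀ (xs : List Int),
    pvDedupA g xs 1 = pvKeep (g.length : Int) xs := by
  have go : ∀ (fuel : Nat) (rest acc : List Int) (last : Int), rest.length ≤ fuel →
      pvDedupAgo g fuel (acc ++ last :: rest) (acc.length + 1)
        = acc ++ last :: pvGo (g.length : Int) last rest := by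
    intro fuel
    induction fuel with
    | zero =>
      intro rest acc last hf
      have : rest = [] := List.length_eq_zero_iff.mp (by omega)
      rw [this, pvDedupAgo]
      simp [pvGo]
    | succ fuel ih =>
      intro rest acc last hf
      match rest with
      | [] =>
        rw [pvDedupAgo, if_neg (by simp)]
        simp [pvGo]
      | y :: ys =>
        have hL : acc ++ last :: y :: ys = (acc ++ [last]) ++ y :: ys := by simp
        have hc1 : acc.length + 1 = (acc ++ [last]).length := by simp
        rw [pvDedupAgo, hL, hc1, if_pos (by simp)]
        have hy : ((acc ++ [last]) ++ y :: ys).getD (acc ++ [last]).length 0 = y :=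
          getD_append_cons _ _ _
        have hlast : ((acc ++ [last]) ++ y :: ys).getD ((acc ++ [last]).length - 1) 0 = last := by
          rw [show (acc ++ [last]).length - 1 = acc.length by simp]
          rw [show (acc ++ [last]) ++ y :: ys = acc ++ last :: y :: ys by simp]
          exact getD_append_cons _ _ _
        rw [hy, hlast]
        by_cases hc : y - last < (g.length : Int)
        · rw [if_pos hc, eraseIdx_append_cons]
          rw [show (acc ++ [last]) ++ ys = acc ++ last :: ys by simp, ← hc1,
            ih ys acc last (by simpa using Nat.lt_succ_iff.mp (by simpa using hf))]
          have hnc : ¬ ((g.length : Int) ≤ y - last) := by omega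
          simp [pvGo, hnc]
        · rw [if_neg hc]
          have h2 := ih ys (acc ++ [last]) y (by simp at hf ⊢; omega)
          rw [h2]
          have hcc : (g.length : Int) ≤ y - last := by omega
          simp [pvGo, hcc]
  intro xs
  match xs with
  | [] =>
    unfold pvDedupA
    rw [show ([] : List Int).length - 1 = 0 by simp, pvDedupAgo]
    simp [pvKeep]
  | x :: rest =>
    have h0 : pvDedupA g (x :: rest) 1 = pvDedupAgo g rest.length (x :: rest) 1 := by
      unfold pvDedupA
      rw [show (x :: rest).length - 1 = rest.length by simp]
    rw [h0]
    have h1 := go rest.length rest [] x (le_refl _)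
    simpa [pvKeep] using h1

-- ---- inner while loops of A ----

lemma loop1_eq (objects : List Int) (L : Int) : ∀ (n : Nat) (ps : List Int)
    (d : PySem.Dict (List Int) (List Int)),
    pvLoop1 objects L d ps n =
      ( ((ps.drop n).filter (fun p => decide (p + L ≤ PySem.List.len objects))).foldl
          (fun d p => d.modify (pvNgram objects p L) [] (· ++ [p])) d,
        ps.take n ++ (ps.drop n).filter (fun p => decide (p + L ≤ PySem.List.len objects)) ) := by
  have H : ∀ (fuel n : Nat) (ps : List Int) (d : PySem.Dict (List Int) (List Int)),
      ps.length ≤ n + fuel →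
      pvLoop1go objects L fuel d ps n =
        ( ((ps.drop n).filter (fun p => decide (p + L ≤ PySem.List.len objects))).foldl
            (fun d p => d.modify (pvNgram objects p L) [] (· ++ [p])) d,
          ps.take n ++ (ps.drop n).filter (fun p => decide (p + L ≤ PySem.List.len objects)) ) := by
    intro fuel
    induction fuel with
    | zero =>
      intro n ps d hf
      have h1 : ps.drop n = [] := List.drop_eq_nil_of_le (by omega)
      have h2 : ps.take n = ps := List.take_of_length_le (by omega)
      rw [pvLoop1go, h1, h2]
      simp
    | succ fuel ih =>
      intro n ps d hf
      rw [pvLoop1go]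
      by_cases h : n < ps.length
      · rw [dif_pos h]
        dsimp only
        by_cases hc : ps[n] + L ≤ PySem.List.len objects
        · rw [if_pos hc]
          rw [ih (n + 1) ps _ (by omega)]
          have hdrop : ps.drop n = ps[n] :: ps.drop (n + 1) := List.drop_eq_getElem_cons h
          have htake : ps.take (n + 1) = ps.take n ++ [ps[n]] := by
            rw [List.take_succ, List.getElem?_eq_getElem h]
            rfl
          rw [hdrop, List.filter_cons_of_pos (by simpa using hc), List.foldl_cons, htake,
            List.append_assoc]
          rfl
        · rw [if_neg hc]
          have hlen : (ps.eraseIdx n).length = ps.length - 1 := by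
            simp [List.length_eraseIdx, h]
          rw [ih n (ps.eraseIdx n) d (by omega)]
          have he := List.eraseIdx_eq_take_drop_succ ps n
          have hlt : (ps.take n).length = n := by
            rw [List.length_take]
            omega
          have ht : (ps.eraseIdx n).take n = ps.take n := by
            rw [he, List.take_append_of_le_length (by omega), List.take_take]
            simp
          have hgen : ∀ (A B : List Int), A.length = n → (A ++ B).drop n = B := by
            intro A B hA
            rw [← hA, List.drop_left]
          have hd : (ps.eraseIdx n).drop n = ps.drop (n + 1) := by
            rw [he]
            exact hgen _ _ hlt
          have hdrop : ps.drop n = ps[n] :: ps.drop (n + 1) := List.drop_eq_getElem_cons h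
          rw [ht, hd, hdrop, List.filter_cons_of_neg (by simpa using hc)]
      · rw [dif_neg h]
        have h1 : ps.drop n = [] := List.drop_eq_nil_of_le (by omega)
        have h2 : ps.take n = ps := List.take_of_length_le (by omega)
        rw [h1, h2]
        simp
  intro n ps d
  exact H (ps.length - n) n ps d (by omega)

lemma loop2_eq (objects : List Int) (L : Int) (d : PySem.Dict (List Int) (List Int)) :
    ∀ (n : Nat) (ps : List Int),
    pvLoop2 objects L d ps n =
      ps.take n ++ (ps.drop n).filter
        (fun p => !((d.getD (pvNgram objects p L) []).length < 2 : Bool)) := by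
  have H : ∀ (fuel n : Nat) (ps : List Int),
      ps.length ≤ n + fuel →
      pvLoop2go objects L d fuel ps n =
        ps.take n ++ (ps.drop n).filter
          (fun p => !((d.getD (pvNgram objects p L) []).length < 2 : Bool)) := by
    intro fuel
    induction fuel with
    | zero =>
      intro n ps hf
      have h1 : ps.drop n = [] := List.drop_eq_nil_of_le (by omega)
      have h2 : ps.take n = ps := List.take_of_length_le (by omega)
      rw [pvLoop2go, h1, h2]
      simp
    | succ fuel ih =>
      intro n ps hf
      rw [pvLoop2go]
      by_cases h : n < ps.length
      · rw [dif_pos h]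
        dsimp only
        by_cases hc : (d.getD (pvNgram objects ps[n] L) []).length < 2
        · rw [if_pos hc]
          have hlen : (ps.eraseIdx n).length = ps.length - 1 := by
            simp [List.length_eraseIdx, h]
          rw [ih n (ps.eraseIdx n) (by omega)]
          have he := List.eraseIdx_eq_take_drop_succ ps n
          have hlt : (ps.take n).length = n := by
            rw [List.length_take]
            omega
          have ht : (ps.eraseIdx n).take n = ps.take n := by
            rw [he, List.take_append_of_le_length (by omega), List.take_take]
            simp
          have hgen : ∀ (A B : List Int), A.length = n → (A ++ B).drop n = B := by
            intro A B hA
            rw [← hA, List.drop_left]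
          have hd : (ps.eraseIdx n).drop n = ps.drop (n + 1) := by
            rw [he]
            exact hgen _ _ hlt
          have hdrop : ps.drop n = ps[n] :: ps.drop (n + 1) := List.drop_eq_getElem_cons h
          rw [ht, hd, hdrop, List.filter_cons_of_neg (by simpa using hc)]
        · rw [if_neg hc]
          rw [ih (n + 1) ps (by omega)]
          have hdrop : ps.drop n = ps[n] :: ps.drop (n + 1) := List.drop_eq_getElem_cons h
          have htake : ps.take (n + 1) = ps.take n ++ [ps[n]] := by
            rw [List.take_succ, List.getElem?_eq_getElem h]
            rfl
          rw [hdrop, List.filter_cons_of_pos (by simpa using hc), htake, List.append_assoc]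
          rfl
      · rw [dif_neg h]
        have h1 : ps.drop n = [] := List.drop_eq_nil_of_le (by omega)
        have h2 : ps.take n = ps := List.take_of_length_le (by omega)
        rw [h1, h2]
        simp
  intro n ps
  exact H (ps.length - n) n ps (by omega)

-- ---- dict structure ----

lemma dict_modify_shift (k : List Int) (f : List Int → List Int) :
    ∀ (pre post : List (List Int × List Int)), (∀ e ∈ pre, (e.1 == k) = false) →
    (PySem.Dict.mk (pre ++ post)).modify k [] f
      = PySem.Dict.mk (pre ++ ((PySem.Dict.mk post).modify k [] f).items) := by
  intro pre post h
  have hany : pre.any (fun p => p.1 == k) = false := by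
    rw [List.any_eq_false]
    intro x hx
    simp [h x hx]
  have hfind : pre.find? (fun p => p.1 == k) = none :=
    List.find?_eq_none.mpr (fun x hx => by simp [h x hx])
  have hmap : pre.map (fun p => if p.1 == k then (k, f ((PySem.Dict.mk post).getD k [])) else p)
      = pre := by
    have h1 : pre.map (fun p => if p.1 == k then (k, f ((PySem.Dict.mk post).getD k [])) else p)
        = pre.map id := List.map_congr_left (fun e he => by rw [h e he]; rfl)
    rw [h1, List.map_id]
  unfold PySem.Dict.modify PySem.Dict.insert PySem.Dict.getD PySem.Dict.get? PySem.Dict.contains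
  simp only [PySem.Dict.items, List.any_append, hany, Bool.false_or, List.find?_append, hfind,
    Option.none_or]
  by_cases hc : post.any (fun p => p.1 == k) = true
  · rw [if_pos hc, if_pos hc, List.map_append]
    rw [show (fun p => if (p.1 == k) = true then
        (k, f ((Option.map (fun x => x.2) (post.find? (fun p => p.1 == k))).getD [])) else p)
      = (fun p => if (p.1 == k) = true then (k, f ((PySem.Dict.mk post).getD k [])) else p) from rfl]
    rw [hmap]
  · rw [if_neg hc, if_neg hc]
    simp [PySem.Dict.items, List.append_assoc]

lemma modfold_shift (objects : List Int) (l : Int) : ∀ (R : List Int)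
    (pre post : List (List Int × List Int)),
    (∀ p ∈ R, ∀ e ∈ pre, (e.1 == pvNgram objects p l) = false) →
    (R.foldl (fun d p => d.modify (pvNgram objects p l) [] (· ++ [p])) (PySem.Dict.mk (pre ++ post))).items
      = pre ++ (R.foldl (fun d p => d.modify (pvNgram objects p l) [] (· ++ [p])) (PySem.Dict.mk post)).items := by
  intro R
  induction R with
  | nil => intro pre post h; simp
  | cons p R ih =>
    intro pre post h
    simp only [List.foldl_cons]
    rw [dict_modify_shift (pvNgram objects p l) (· ++ [p]) pre post
      (fun e he => h p List.mem_cons_self e he)]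
    exact ih pre _ (fun a ha e he => h a (List.mem_cons_of_mem _ ha) e he)


lemma getD_modfold (objects : List Int) (l : Int) (R : List Int)
    (d : PySem.Dict (List Int) (List Int)) (g : List Int) :
    (R.foldl (fun d p => d.modify (pvNgram objects p l) [] (· ++ [p])) d).getD g []
      = d.getD g [] ++ R.filter (fun p => pvNgram objects p l == g) := by
  have hb : R.foldl (fun d p => d.modify (pvNgram objects p l) [] (· ++ [p])) d
      = (R.map (fun p => (pvNgram objects p l, p))).foldl
          (fun d pr => d.modify pr.1 [] (· ++ [pr.2])) d := by
    rw [List.foldl_map]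
  rw [hb, PySem.Dict.getD_foldl_modify_append]
  congr 1
  rw [List.filter_map, List.map_map]
  simp [Function.comp_def]


lemma items_modfold (objects : List Int) (l : Int) (R : List Int) :
    (R.foldl (fun d p => d.modify (pvNgram objects p l) [] (· ++ [p])) PySem.Dict.empty).items
      = pvGrp objects l R := by
  have hnd : (R.foldl (fun d p => d.modify (pvNgram objects p l) [] (· ++ [p]))
      PySem.Dict.empty).keys.Nodup := by
    apply PySem.Dict.nodup_keys_foldl_modify_key R (fun p => pvNgram objects p l) []
      (fun _ p => (· ++ [p]))
    simp [PySem.Dict.keys, PySem.Dict.empty]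
  have hkeys : (R.foldl (fun d p => d.modify (pvNgram objects p l) [] (· ++ [p]))
      PySem.Dict.empty).keys = PySem.Set.ofList (R.map (fun p => pvNgram objects p l)) := by
    rw [PySem.Dict.keys_foldl_modify_key R (fun p => pvNgram objects p l) []
      (fun _ p => (· ++ [p]))]
    rw [show (PySem.Dict.empty : PySem.Dict (List Int) (List Int)).keys = [] from rfl]
    exact PySem.Set.update_nil_left _
  rw [PySem.Dict.items_eq_map_keys _ hnd [], hkeys]
  unfold pvGrp
  apply List.map_congr_left
  intro g hg
  rw [getD_modfold]
  simp


-- ---- B's emit loop ----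

lemma contains_false_of_len (d : PySem.Dict (List Int) (List Int)) (k : List Int)
    (h : ∀ e ∈ d.items, e.1 ≠ k) : d.contains k = false := by
  unfold PySem.Dict.contains
  rw [List.any_eq_false]
  intro e he
  simp [h e he]

lemma emit_fold (l : Int) : ∀ (items : List (List Int × List Int))
    (d : PySem.Dict (List Int) (List Int)) (b : Bool),
    (items.map Prod.fst).Nodup →
    (∀ it ∈ items, ∀ e ∈ d.items, e.1 ≠ it.1) →
    items.foldl (fun st it =>
        if it.2.length < 2 then st
        else
          ((if 1 < ((PySem.List.slice it.2 (some 1) none).foldl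
              (fun kept p => if l ≤ p - PySem.List.pyGetD kept (-1) 0 then kept ++ [p] else kept)
              [PySem.List.pyGetD it.2 0 0]).length then
            st.1.insert it.1 ((PySem.List.slice it.2 (some 1) none).foldl
              (fun kept p => if l ≤ p - PySem.List.pyGetD kept (-1) 0 then kept ++ [p] else kept)
              [PySem.List.pyGetD it.2 0 0]) else st.1), true)) (d, b)
      = (PySem.Dict.mk (d.items ++ pvEmit l items),
         b || items.any (fun it => !(it.2.length < 2 : Bool))) := by
  intro items
  induction items with
  | nil => intro d b _ _; simp [pvEmit]
  | cons it items ih =>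
    intro d b hnd hfresh
    have hnd' : (items.map Prod.fst).Nodup := (List.nodup_cons.1 (by simpa using hnd)).2
    simp only [List.foldl_cons]
    by_cases hlen : it.2.length < 2
    · rw [if_pos hlen]
      rw [ih d b hnd' (fun a ha e he => hfresh a (List.mem_cons_of_mem _ ha) e he)]
      have he : pvEmit l (it :: items) = pvEmit l items := by
        unfold pvEmit
        rw [List.filter_cons_of_neg (by simp [hlen])]
      rw [he]
      simp [show it.2.length ≤ 1 by omega]
    · rw [if_neg hlen]
      obtain ⟨x, xs, hit⟩ : ∃ x xs, it.2 = x :: xs := by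
        cases hc : it.2 with
        | nil => rw [hc] at hlen; simp at hlen
        | cons a bs => exact ⟨a, bs, rfl⟩
      have hkept : (PySem.List.slice it.2 (some 1) none).foldl
          (fun kept p => if l ≤ p - PySem.List.pyGetD kept (-1) 0 then kept ++ [p] else kept)
          [PySem.List.pyGetD it.2 0 0] = pvKeep l it.2 := by
        rw [hit, PySem.List.slice_from_one, PySem.List.pyGetD_zero_cons, List.tail_cons]
        have hkf := keep_fold l xs [] x
        simpa [pvKeep] using hkf
      rw [hkept]
      have hcont : d.contains it.1 = false :=
        contains_false_of_len d it.1 (fun e he => hfresh it List.mem_cons_self e he)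
      have hnotin : it.1 ∉ items.map Prod.fst := (List.nodup_cons.1 (by simpa using hnd)).1
      by_cases hk : 1 < (pvKeep l it.2).length
      · rw [if_pos hk]
        have hins := PySem.Dict.items_insert_of_not_contains d (pvKeep l it.2) hcont
        rw [ih (d.insert it.1 (pvKeep l it.2)) true hnd' ?fresh]
        case fresh =>
          intro a ha e he
          rw [hins] at he
          rcases List.mem_append.1 he with h1 | h1
          · exact hfresh a (List.mem_cons_of_mem _ ha) e h1
          · have he2 : e = (it.1, pvKeep l it.2) := by simpa using h1
            rw [he2]
            intro hcontra
            exact hnotin (by rw [hcontra]; exact List.mem_map_of_mem ha)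
        rw [hins]
        have he : pvEmit l (it :: items) = (it.1, pvKeep l it.2) :: pvEmit l items := by
          unfold pvEmit
          rw [List.filter_cons_of_pos (by simp [hlen]), List.map_cons,
            List.filter_cons_of_pos (by simpa using hk)]
        rw [he]
        simp [show 1 < it.2.length by omega]
      · rw [if_neg hk]
        rw [ih d true hnd' (fun a ha e he => hfresh a (List.mem_cons_of_mem _ ha) e he)]
        have he : pvEmit l (it :: items) = pvEmit l items := by
          unfold pvEmit
          rw [List.filter_cons_of_pos (by simp [hlen]), List.map_cons,
            List.filter_cons_of_neg (by simpa using hk)]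
        rw [he]
        simp [show 1 < it.2.length by omega]

lemma pvGrp_keylen (objects : List Int) {l : Int} (h2 : 2 ≤ l) {R : List Int}
    (hR : ∀ p ∈ R, p ∈ pvOcc objects l) :
    ∀ it ∈ pvGrp objects l R, it.1.length = l.toNat := by
  intro it hit
  obtain ⟨γ, hγ, rfl⟩ := List.mem_map.1 hit
  obtain ⟨p, hp, rfl⟩ := List.mem_map.1 ((PySem.Set.mem_ofList _ _).1 hγ)
  obtain ⟨hp0, hpl⟩ := (mem_pvOcc objects (by omega)).1 (hR p hp)
  exact length_pvNgram objects hp0 (by omega) hpl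

lemma pvGrp_fst (objects : List Int) (l : Int) (R : List Int) :
    (pvGrp objects l R).map Prod.fst
      = PySem.Set.ofList (R.map (fun p => pvNgram objects p l)) := by
  unfold pvGrp
  rw [List.map_map]
  exact List.map_id _

lemma pvFinal_keylt (items : List (List Int × List Int)) (n : Nat)
    (h : ∀ e ∈ items, e.1.length < n) : ∀ e ∈ pvFinal items, e.1.length < n := by
  intro e he
  unfold pvFinal at he
  obtain ⟨e0, he0, rfl⟩ := List.mem_map.1 (List.mem_filter.1 he).1
  exact h e0 he0

lemma pvFinal_append (A B : List (List Int × List Int)) :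
    pvFinal (A ++ B) = pvFinal A ++ pvFinal B := by
  unfold pvFinal
  rw [List.map_append, List.filter_append]

-- ---- per-level output equality ----

lemma level_eq (objects : List Int) (l : Int) (q : Int → Bool) (h2 : 2 ≤ l)
    (hq : ∀ p ∈ pvOcc objects l, pvRep objects l p = true → q p = true) :
    pvFinal (pvGrp objects l ((pvOcc objects l).filter q))
      = pvEmit l (pvGrp objects l (pvOcc objects l)) := by
  have h0l : (0:Int) ≤ l := by omega
  have hVR : ∀ γ : List Int, (pvOcc objects l).filter
        (fun a => (pvNgram objects a l == γ) && q a)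
      = ((pvOcc objects l).filter q).filter (fun p => pvNgram objects p l == γ) := by
    intro γ
    rw [List.filter_filter]
  have hglenR : ∀ γ ∈ PySem.Set.ofList
      ((((pvOcc objects l).filter q)).map (fun p => pvNgram objects p l)),
      γ.length = l.toNat := by
    intro γ hγ
    obtain ⟨p, hp, rfl⟩ := List.mem_map.1 ((PySem.Set.mem_ofList _ _).1 hγ)
    obtain ⟨hp0, hpl⟩ := (mem_pvOcc objects (by omega)).1 (List.mem_filter.1 hp).1
    exact length_pvNgram objects hp0 h0l hpl
  have hVle : ∀ γ : List Int, (((pvOcc objects l).filter q).filter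
      (fun p => pvNgram objects p l == γ)).length
      ≤ ((pvOcc objects l).filter (fun p => pvNgram objects p l == γ)).length := by
    intro γ
    rw [List.filter_comm]
    exact List.Sublist.length_le List.filter_sublist
  have hVeq : ∀ γ : List Int,
      2 ≤ ((pvOcc objects l).filter (fun p => pvNgram objects p l == γ)).length →
      ((pvOcc objects l).filter q).filter (fun p => pvNgram objects p l == γ)
        = (pvOcc objects l).filter (fun p => pvNgram objects p l == γ) := by
    intro γ hγ
    exact pvVra_eq_pvVocc objects q h2 hq hγ
  unfold pvFinal pvEmit pvGrp
  simp only [List.map_map, List.filter_map, List.filter_filter, Function.comp_def]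
  have hstep1 : (PySem.Set.ofList
        ((((pvOcc objects l).filter q)).map (fun p => pvNgram objects p l))).filter
        (fun γ => decide (1 < (pvKeep (γ.length : Int)
          ((pvOcc objects l).filter (fun a => (pvNgram objects a l == γ) && q a))).length))
      = (PySem.Set.ofList
        ((((pvOcc objects l).filter q)).map (fun p => pvNgram objects p l))).filter
        (fun γ => decide (1 < (pvKeep l
            ((pvOcc objects l).filter (fun p => pvNgram objects p l == γ))).length)
          && !decide (((pvOcc objects l).filter
            (fun p => pvNgram objects p l == γ)).length < 2)) := by
    apply List.filter_congr
    intro γ hγ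
    rw [hVR γ]
    have hcast : ((γ.length : Nat) : Int) = l := by
      rw [hglenR γ hγ]
      omega
    rw [hcast]
    by_cases hv : 2 ≤ ((pvOcc objects l).filter (fun p => pvNgram objects p l == γ)).length
    · rw [hVeq γ hv, decide_eq_false (show ¬ (((pvOcc objects l).filter
        (fun p => pvNgram objects p l == γ)).length < 2) by omega)]
      simp
    · have h1 : ((pvOcc objects l).filter (fun p => pvNgram objects p l == γ)).length ≤ 1 := by
        omega
      have h2' : (((pvOcc objects l).filter q).filter
          (fun p => pvNgram objects p l == γ)).length ≤ 1 := le_trans (hVle γ) h1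
      have hnk : ¬ (1 < (pvKeep l (((pvOcc objects l).filter q).filter
          (fun p => pvNgram objects p l == γ))).length) := by
        intro hgt
        have := pvKeep_short l hgt
        omega
      rw [decide_eq_false hnk, decide_eq_true (show ((pvOcc objects l).filter
        (fun p => pvNgram objects p l == γ)).length < 2 by omega)]
      simp
  have hstep2 := set_filter_eq (fun p => pvNgram objects p l)
      (fun γ => decide (1 < (pvKeep l
          ((pvOcc objects l).filter (fun p => pvNgram objects p l == γ))).length)
        && !decide (((pvOcc objects l).filter
          (fun p => pvNgram objects p l == γ)).length < 2))
      (pvOcc objects l) q ?cond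
  case cond =>
    intro x hx hPB
    rw [Bool.and_eq_true] at hPB
    have h2v := hPB.2
    simp only [Bool.not_eq_true', decide_eq_false_iff_not] at h2v
    apply hq x hx
    unfold pvRep pvVocc
    rw [decide_eq_true_eq]
    omega
  rw [hstep1, ← hstep2]
  apply List.map_congr_left
  intro γ hγ
  have hmem := List.mem_filter.1 hγ
  have hPB := hmem.2
  rw [Bool.and_eq_true] at hPB
  have h2v := hPB.2
  simp only [Bool.not_eq_true', decide_eq_false_iff_not] at h2v
  have hv : 2 ≤ ((pvOcc objects l).filter (fun p => pvNgram objects p l == γ)).length := by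
    omega
  have hglenOcc : γ.length = l.toNat := by
    obtain ⟨p, hp, rfl⟩ := List.mem_map.1 ((PySem.Set.mem_ofList _ _).1 hmem.1)
    obtain ⟨hp0, hpl⟩ := (mem_pvOcc objects (by omega)).1 hp
    exact length_pvNgram objects hp0 h0l hpl
  have hcast : ((γ.length : Nat) : Int) = l := by
    rw [hglenOcc]
    omega
  rw [hVR γ, hcast, hVeq γ hv]

-- ---- survivor characterisation ----

lemma pvQ_succ (objects : List Int) {l : Int} (h2 : 2 ≤ l) (p : Int) :
    pvQ objects (l + 1) p = pvRep objects l p := by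
  unfold pvQ
  rw [if_neg (by omega)]
  norm_num

lemma survivors_eq (objects : List Int) {l : Int} (h2 : 2 ≤ l) :
    (pvRA objects l).filter
        (fun p => !((((pvOcc objects l).filter (pvQ objects l)).filter
            (fun r => pvNgram objects r l == pvNgram objects p l)).length < 2 : Bool))
      = pvPS objects (l + 1) := by
  have hps : pvPS objects (l + 1) = (pvOcc objects l).filter (fun p => pvQ objects (l + 1) p) := by
    unfold pvPS pvOcc
    rw [List.filter_filter]
    apply List.filter_congr
    intro p _
    rw [show l + 1 - 1 = l by ring]
    exact Bool.and_comm _ _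
  rw [hps]
  unfold pvRA
  rw [List.filter_filter]
  apply List.filter_congr
  intro p hp
  rw [pvQ_succ objects h2]
  cases hrep : pvRep objects l p
  · -- not repeated: left side must be false
    cases hQ : pvQ objects l p
    · simp [hQ]
    · have h1 : ((pvOcc objects l).filter (pvQ objects l)).filter
          (fun r => pvNgram objects r l == pvNgram objects p l)
          = ((pvOcc objects l).filter
              (fun r => pvNgram objects r l == pvNgram objects p l)).filter (pvQ objects l) :=
        List.filter_comm _ _ _
      have h2' : (((pvOcc objects l).filter
          (fun r => pvNgram objects r l == pvNgram objects p l)).filter (pvQ objects l)).Sublist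
          ((pvOcc objects l).filter (fun r => pvNgram objects r l == pvNgram objects p l)) :=
        List.filter_sublist
      have hlt : ((pvOcc objects l).filter
          (fun q => pvNgram objects q l == pvNgram objects p l)).length < 2 := by
        unfold pvRep pvVocc at hrep
        have := of_decide_eq_false hrep
        omega
      have hW : ((pvOcc objects l).filter
          (fun a => (pvNgram objects a l == pvNgram objects p l) && pvQ objects l a)).length
          < 2 := by
        rw [← List.filter_filter, h1]
        have := h2'.length_le
        omega
      simp [hW]
  · -- repeated: q holds and the filtered list is the full occurrence list
    have hQ : pvQ objects l p = true := hq_pvQ objects h2 p hp hrep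
    have hrep' : 2 ≤ (pvVocc objects l (pvNgram objects p l)).length := by
      unfold pvRep at hrep
      exact of_decide_eq_true hrep
    have hVeq := pvVra_eq_pvVocc objects (pvQ objects l) h2 (hq_pvQ objects h2) hrep'
    rw [hVeq]
    unfold pvVocc at hrep' ⊢
    simp [hQ, show ¬ (((pvOcc objects l).filter
      (fun q => pvNgram objects q l == pvNgram objects p l)).length < 2) by omega]

lemma ps_filter_eq_ra (objects : List Int) {l : Int} (h2 : 2 ≤ l) :
    (pvPS objects l).filter (fun p => decide (p + l ≤ PySem.List.len objects)) = pvRA objects l := by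
  unfold pvPS pvRA pvOcc
  rw [List.filter_filter, List.filter_filter]
  apply List.filter_congr
  intro p _
  simp only [PySem.List.len_eq]
  by_cases hin : p + l ≤ (objects.length : Int)
  · have h1 : p + (l - 1) ≤ (objects.length : Int) := by omega
    simp [hin, h1, Bool.and_comm]
  · simp [hin]

-- ---- trivial-tail lemma for A ----

lemma fold_skip (objects : List Int) : ∀ (L : List Int) (D : PySem.Dict (List Int) (List Int)),
    (L.foldl (fun st (length : Int) => if 0 < st.2.length then
        ((pvLoop1 objects length st.1 st.2 0).1,
          pvLoop2 objects length (pvLoop1 objects length st.1 st.2 0).1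
            (pvLoop1 objects length st.1 st.2 0).2 0)
      else st) (D, ([] : List Int))) = (D, []) := by
  intro L
  induction L with
  | nil => intro D; rfl
  | cons x xs ih =>
    intro D
    simp only [List.foldl_cons]
    have hg : ¬ (0 < ((D, ([] : List Int)).2.length)) := by simp
    rw [if_neg hg]
    exact ih D

-- ---- main induction ----

lemma pvMain (objects : List Int) : ∀ (k : Nat) (l : Int)
    (D OUT : PySem.Dict (List Int) (List Int)),
    2 ≤ l →
    (PySem.Int.floordiv (PySem.List.len objects) 2 + 1 - l).toNat = k →
    (∀ e ∈ D.items, e.1.length < l.toNat) →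
    pvFinal D.items = OUT.items →
    pvFinal (((PySem.List.pyRange l (PySem.Int.floordiv (PySem.List.len objects) 2 + 1) 1).foldl
        (fun st (length : Int) => if 0 < st.2.length then
            let r1 := pvLoop1 objects length st.1 st.2 0
            (r1.1, pvLoop2 objects length r1.1 r1.2 0)
          else st)
        (D, pvPS objects l)).1.items)
      = (pvLevelsBgo objects k OUT l).items := by
  intro k
  induction k with
  | zero =>
    intro l D OUT h2 hk hkeys hout
    rw [PySem.List.pyRange_one_eq_nil (by omega), List.foldl_nil]
    exact hout
  | succ k ih =>
    intro l D OUT h2 hk hkeys hout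
    have hM : l ≤ PySem.Int.floordiv (PySem.List.len objects) 2 := by omega
    have hMn : PySem.Int.floordiv (PySem.List.len objects) 2
        = ((objects.length / 2 : Nat) : Int) := by
      rw [PySem.List.len_eq]
      exact_mod_cast PySem.Int.floordiv_natCast objects.length 2
    have hdle := Nat.div_le_self objects.length 2
    have hlN : l ≤ PySem.List.len objects := by
      rw [hMn] at hM
      rw [PySem.List.len_eq]
      omega
    have houtlen : ∀ e ∈ OUT.items, e.1.length < l.toNat := by
      rw [← hout]
      exact pvFinal_keylt D.items l.toNat hkeys
    have hfreshB : ∀ it ∈ pvGrp objects l (pvOcc objects l), ∀ e ∈ OUT.items, e.1 ≠ it.1 := by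
      intro it hit e he
      have h1 := houtlen e he
      have h2' := pvGrp_keylen objects h2 (fun p hp => hp) it hit
      intro hcontra
      rw [hcontra, h2'] at h1
      omega
    have hndB : ((pvGrp objects l (pvOcc objects l)).map Prod.fst).Nodup := by
      rw [pvGrp_fst]
      exact PySem.Set.nodup_ofList _
    rw [PySem.List.pyRange_one_cons (show l < PySem.Int.floordiv (PySem.List.len objects) 2 + 1
      by omega), List.foldl_cons]
    conv_rhs => rw [pvLevelsBgo]
    rw [if_pos hM]
    dsimp only
    have hocc : PySem.List.pyRange 0 (PySem.List.len objects - l + 1) 1 = pvOcc objects l :=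
      (occ_eq_pyRange objects (by omega) (by omega)).symm
    rw [hocc, items_modfold objects l (pvOcc objects l),
      emit_fold l (pvGrp objects l (pvOcc objects l)) OUT false hndB hfreshB, Bool.false_or]
    dsimp only
    by_cases hps : pvPS objects l = []
    · -- no surviving position: A's guard skips from here on, B finds nothing and stops
      have hnorep : ∀ it ∈ pvGrp objects l (pvOcc objects l), it.2.length < 2 := by
        intro it hit
        by_contra hge
        obtain ⟨γ, hγ, heq⟩ := List.mem_map.1 hit
        obtain ⟨p, hp, rfl⟩ := List.mem_map.1 ((PySem.Set.mem_ofList _ _).1 hγ)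
        obtain ⟨hp0, hpl⟩ := (mem_pvOcc objects (by omega)).1 hp
        rw [← heq] at hge
        have hrep : pvRep objects l p = true := by
          unfold pvRep pvVocc
          rw [decide_eq_true_eq]
          simp only at hge
          omega
        have hpmem : p ∈ pvPS objects l := by
          unfold pvPS
          rw [List.mem_filter]
          refine ⟨(mem_pvP objects).2 ⟨hp0, by omega⟩, ?_⟩
          rw [Bool.and_eq_true, decide_eq_true_eq]
          exact ⟨by omega, hq_pvQ objects h2 p hp hrep⟩
        rw [hps] at hpmem
        exact List.not_mem_nil hpmem
      have hany : (pvGrp objects l (pvOcc objects l)).any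
          (fun it => !(it.2.length < 2 : Bool)) = false := by
        rw [List.any_eq_false]
        intro it hit
        simp [hnorep it hit]
      have hemit : pvEmit l (pvGrp objects l (pvOcc objects l)) = [] := by
        unfold pvEmit
        have hinner : (pvGrp objects l (pvOcc objects l)).filter
            (fun it => !(it.2.length < 2 : Bool)) = [] :=
          List.filter_eq_nil_iff.mpr (fun it hit => by simp [hnorep it hit])
        rw [hinner]
        rfl
      rw [hps, hany, hemit, List.append_nil, if_neg Bool.false_ne_true,
        if_neg (show ¬ 0 < ([] : List Int).length by simp), fold_skip]
      exact hout
    · -- the level is processed on both sides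
      have hguard : 0 < (pvPS objects l).length := List.length_pos_iff.mpr hps
      have hfreshA : ∀ p ∈ pvRA objects l, ∀ e ∈ D.items,
          (e.1 == pvNgram objects p l) = false := by
        intro p hp e he
        obtain ⟨hp0, hpl⟩ := (mem_pvOcc objects (by omega)).1 (List.mem_filter.1 hp).1
        have h1 := hkeys e he
        refine beq_eq_false_iff_ne.mpr (fun hc => ?_)
        rw [hc, length_pvNgram objects hp0 (by omega) hpl] at h1
        omega
      have hDitems : (List.foldl (fun d p => d.modify (pvNgram objects p l) [] (· ++ [p]))
          D (pvRA objects l)).items = D.items ++ pvGrp objects l (pvRA objects l) := by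
        have h0 : D = PySem.Dict.mk (D.items ++ []) := by
          apply PySem.Dict.ext
          simp
        conv_lhs => rw [h0]
        rw [modfold_shift objects l (pvRA objects l) D.items [] hfreshA]
        congr 1
        exact items_modfold objects l (pvRA objects l)
      have hstep : (if 0 < (pvPS objects l).length then
            ((pvLoop1 objects l D (pvPS objects l) 0).1,
              pvLoop2 objects l (pvLoop1 objects l D (pvPS objects l) 0).1
                (pvLoop1 objects l D (pvPS objects l) 0).2 0)
          else (D, pvPS objects l))
          = (PySem.Dict.mk (D.items ++ pvGrp objects l (pvRA objects l)),
             pvPS objects (l + 1)) := by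
        rw [if_pos hguard, loop1_eq objects l 0 (pvPS objects l) D]
        dsimp only
        rw [List.drop_zero, List.take_zero, List.nil_append, ps_filter_eq_ra objects h2,
          loop2_eq objects l _ 0 (pvRA objects l)]
        rw [List.drop_zero, List.take_zero, List.nil_append]
        refine Prod.ext ?_ ?_
        · show (List.foldl (fun d p => d.modify (pvNgram objects p l) [] (· ++ [p]))
            D (pvRA objects l)) = _
          apply PySem.Dict.ext
          rw [hDitems]
        · show (pvRA objects l).filter _ = _
          have hre : ∀ p ∈ pvRA objects l,
              (List.foldl (fun d p => d.modify (pvNgram objects p l) [] (· ++ [p]))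
                D (pvRA objects l)).getD (pvNgram objects p l) []
              = (pvRA objects l).filter (fun r => pvNgram objects r l == pvNgram objects p l) := by
            intro p hp
            obtain ⟨hp0, hpl⟩ := (mem_pvOcc objects (by omega)).1 (List.mem_filter.1 hp).1
            rw [getD_modfold]
            have hget : D.getD (pvNgram objects p l) [] = [] := by
              apply PySem.Dict.getD_of_not_contains
              apply contains_false_of_len
              intro e he hc
              have h1 := hkeys e he
              rw [hc, length_pvNgram objects hp0 (by omega) hpl] at h1
              omega
            rw [hget, List.nil_append]
          rw [List.filter_congr (fun p hp => by rw [hre p hp])]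
          exact survivors_eq objects h2
      rw [hstep]
      by_cases hfound : (pvGrp objects l (pvOcc objects l)).any
          (fun it => !(it.2.length < 2 : Bool)) = true
      · rw [if_pos hfound]
        refine ih (l + 1) (PySem.Dict.mk (D.items ++ pvGrp objects l (pvRA objects l)))
          (PySem.Dict.mk (OUT.items ++ pvEmit l (pvGrp objects l (pvOcc objects l))))
          (by omega) (by omega) ?keys ?out
        case keys =>
          intro e he
          rcases List.mem_append.1 he with h1 | h1
          · have := hkeys e h1
            omega
          · have := pvGrp_keylen objects h2 (fun p hp => (List.mem_filter.1 hp).1) e h1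
            omega
        case out =>
          show pvFinal (D.items ++ pvGrp objects l (pvRA objects l)) = _
          rw [pvFinal_append, hout]
          congr 1
          exact level_eq objects l (pvQ objects l) h2 (hq_pvQ objects h2)
      · rw [if_neg hfound]
        have hfound' : (pvGrp objects l (pvOcc objects l)).any
            (fun it => !(it.2.length < 2 : Bool)) = false := by
          cases hc : (pvGrp objects l (pvOcc objects l)).any
              (fun it => !(it.2.length < 2 : Bool))
          · rfl
          · exact absurd hc hfound
        have hemit : pvEmit l (pvGrp objects l (pvOcc objects l)) = [] := by
          unfold pvEmit
          have hinner : (pvGrp objects l (pvOcc objects l)).filter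
              (fun it => !(it.2.length < 2 : Bool)) = [] :=
            List.filter_eq_nil_iff.mpr (fun it hit => by
              have := List.any_eq_false.mp hfound' it hit
              simpa using this)
          rw [hinner]
          rfl
        have hps1 : pvPS objects (l + 1) = [] := by
          rw [List.eq_nil_iff_forall_not_mem]
          intro p hp
          have h1 := List.mem_filter.1 hp
          have hpred := h1.2
          rw [Bool.and_eq_true, decide_eq_true_eq] at hpred
          obtain ⟨hin, hQ'⟩ := hpred
          rw [pvQ_succ objects h2] at hQ'
      
          have hpocc : p ∈ pvOcc objects l :=
            (mem_pvOcc objects (by omega)).2 ⟨((mem_pvP objects).1 h1.1).1, by omega⟩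
          have hitem : (pvNgram objects p l, (pvOcc objects l).filter
              (fun r => pvNgram objects r l == pvNgram objects p l))
              ∈ pvGrp objects l (pvOcc objects l) := by
            unfold pvGrp
            exact List.mem_map.2 ⟨pvNgram objects p l,
              (PySem.Set.mem_ofList _ _).2 (List.mem_map.2 ⟨p, hpocc, rfl⟩), rfl⟩
          have hlen2 : 2 ≤ ((pvOcc objects l).filter
              (fun r => pvNgram objects r l == pvNgram objects p l)).length := by
            unfold pvRep pvVocc at hQ'
            exact of_decide_eq_true hQ'
          have hany2 := List.any_eq_false.mp hfound' _ hitem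
          simp only [Bool.not_eq_true', decide_eq_false_iff_not, Decidable.not_not] at hany2
          omega
        rw [hps1, fold_skip]
        show pvFinal (D.items ++ pvGrp objects l (pvRA objects l)) = _
        rw [pvFinal_append, hout]
        have hlvl : pvFinal (pvGrp objects l (pvRA objects l)) = [] := by
          have hle := level_eq objects l (pvQ objects l) h2 (hq_pvQ objects h2)
          rw [hemit] at hle
          exact hle
        rw [hlvl, hemit, List.append_nil]

-- ===== VERDICT (by name: the statement is the Claim_ definition above) =====
theorem find_repeated_ngrams_py_spec : Claim_equal_find_repeated_ngrams_py := by
  intro objects _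
  unfold Spec_find_repeated_ngrams_py find_repeated_ngrams_py find_repeated_ngrams_py_alt
  dsimp only
  have hps2 : PySem.List.pyRange 0 (PySem.List.len objects) 1 = pvPS objects 2 := by
    unfold pvPS pvP
    symm
    rw [List.filter_eq_self]
    intro a ha
    rw [PySem.List.mem_pyRange_one] at ha
    have h2 : pvQ objects 2 a = true := by
      unfold pvQ
      rw [if_pos (le_refl (2:Int))]
    simp only [h2, Bool.and_true]
    rw [decide_eq_true_eq]
    omega
  rw [hps2]
  have hmap : ∀ (X : List (List Int × List Int)),
      X.map (fun e => (e.1, pvDedupA e.1 e.2 1))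
        = X.map (fun e => (e.1, pvKeep (e.1.length : Int) e.2)) := fun X =>
    List.map_congr_left (fun e _ => by rw [dedupA_eq_keep])
  rw [hmap]
  exact pvMain objects ((PySem.Int.floordiv (PySem.List.len objects) 2 + 1 - 2).toNat) 2
    PySem.Dict.empty PySem.Dict.empty (le_refl 2) rfl
    (by intro e he; simp [PySem.Dict.empty] at he) rfl
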